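-- pv_equiv track=rewrite | github.com/Tawana2000/Python | Python Intermediate Challenges/baumsweet-sequence.py | baumsweet_sequence
-- ===== SOURCE A (Python) =====
-- def baumsweet_sequence(n):
--     result = []
--     for i in range(1, n + 1):
--         binary = bin(i)[2:]
--
--         zero_blocks = binary.split('1')
--
--         if all(len(block) % 2 == 0 for block in zero_blocks):
--             result.append(1)
--         else:
--             result.append(0)
--     return result
-- ===== SOURCE B (Python) =====
-- def baumsweet_sequence(n):
--     # One-pass DP on the Baum-Sweet recurrence
--     # b(2m+1) = b(m), b(4m) = b(m), b(4m+2) = 0; the list starts with the seed value for index zero.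
--     b = [1]
--     for i in range(1, n + 1):
--         if i % 2 == 1:
--             b.append(b[i // 2])
--         elif i % 4 == 0:
--             b.append(b[i // 4])
--         else:
--             b.append(0)
--     return b[1:]
-- ===== Notes on version B (the rewrite author's own statement) =====
-- stated objective: faster
-- what changed: Instead of building each number's binary string and splitting it on '1' to test zero-block parities, B fills one DP list via the Baum-Sweet recurrence b(2m+1)=b(m), b(4m)=b(m), b(4m+2)=0 in a single pass with O(1) work per element.
import Mathlib
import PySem

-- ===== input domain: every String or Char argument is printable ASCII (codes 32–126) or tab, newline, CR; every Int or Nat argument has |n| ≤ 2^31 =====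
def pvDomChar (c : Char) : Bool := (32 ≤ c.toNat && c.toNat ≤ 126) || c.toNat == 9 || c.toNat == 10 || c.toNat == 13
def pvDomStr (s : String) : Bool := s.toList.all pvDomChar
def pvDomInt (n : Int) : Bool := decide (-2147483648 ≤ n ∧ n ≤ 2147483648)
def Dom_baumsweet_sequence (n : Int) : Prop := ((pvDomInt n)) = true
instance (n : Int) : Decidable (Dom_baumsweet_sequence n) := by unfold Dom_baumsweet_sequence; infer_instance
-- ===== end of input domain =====

-- B replaces the per-element binary-string build + split('1') parity test by a one-pass DP
-- on the Baum-Sweet recurrence b(2m+1)=b(m), b(4m)=b(m), b(4m+2)=0 (objective: faster).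

-- ===== PORT A =====
def baumsweet_sequence (n : Int) : List Int :=
  (PySem.List.pyRange 1 (n + 1) 1).foldl (fun result i =>
    let binary : String := PySem.Str.slice (PySem.Int.pyBin i) (some 2) none
    -- binary.split('1'): a nonempty separator, so it is Chars.splitOn on the code points
    let zero_blocks : List (List Char) := PySem.Chars.splitOn binary.toList ['1']
    if zero_blocks.all (fun block => PySem.Int.mod (PySem.Chars.len block) 2 == 0) then
      result ++ [1]
    else
      result ++ [0]) []

-- ===== PORT B =====
def baumsweet_sequence_alt (n : Int) : List Int :=
  let b : List Int := (PySem.List.pyRange 1 (n + 1) 1).foldl (fun b i =>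
    if PySem.Int.mod i 2 == 1 then
      b ++ [PySem.List.pyGetD b (PySem.Int.floordiv i 2) 0]
    else if PySem.Int.mod i 4 == 0 then
      b ++ [PySem.List.pyGetD b (PySem.Int.floordiv i 4) 0]
    else
      b ++ [0]) [1]
  PySem.List.slice b (some 1) none

-- ===== PRECONDITION & SPEC =====
def Spec_baumsweet_sequence (n : Int) (out : List Int) : Prop := out = baumsweet_sequence_alt n
instance (n : Int) (out : List Int) : Decidable (Spec_baumsweet_sequence n out) := by unfold Spec_baumsweet_sequence; infer_instance

-- ===== CLAIM (what is proved, stated in full; the proofs are below) =====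
def Claim_equal_baumsweet_sequence : Prop := ∀ (n : Int), Dom_baumsweet_sequence n → Spec_baumsweet_sequence n (baumsweet_sequence n)

-- ===== LEMMAS AND PROOFS =====

-- The Baum-Sweet value as a recursive function on Nat (the mathematical middle ground).
def bsRec : Nat → Int
  | 0 => 1
  | (m + 1) =>
    if (m + 1) % 2 = 1 then bsRec ((m + 1) / 2)
    else if (m + 1) % 4 = 0 then bsRec ((m + 1) / 4)
    else 0
decreasing_by all_goals omega

-- Binary digits of n, most significant first (= Nat.toDigits 2 n).
def bits (n : Nat) : List Char :=
  if n < 2 then [Nat.digitChar n] else bits (n / 2) ++ [Nat.digitChar (n % 2)]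
decreasing_by omega

lemma toDigitsCore_eq_bits : ∀ (fuel n : Nat) (ds : List Char), n < fuel →
    Nat.toDigitsCore 2 fuel n ds = bits n ++ ds := by
  intro fuel
  induction fuel with
  | zero => omega
  | succ f ih =>
    intro n ds h
    simp only [Nat.toDigitsCore]
    by_cases h2 : n / 2 = 0
    · rw [if_pos h2, bits]
      have : n < 2 := by omega
      rw [if_pos this]
      have : n % 2 = n := by omega
      rw [this]
      simp
    · rw [if_neg h2, ih _ _ (by omega)]
      conv_rhs => rw [bits]
      rw [if_neg (show ¬ n < 2 by omega)]
      simp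

lemma toDigits_eq_bits (n : Nat) : Nat.toDigits 2 n = bits n := by
  have := toDigitsCore_eq_bits (n + 1) n [] (by omega)
  simpa [Nat.toDigits] using this

-- Straight structural model of split('1').
def sp : List Char → List (List Char)
  | [] => [[]]
  | c :: cs => if c = '1' then [] :: sp cs else (sp cs).modifyHead (fun b => c :: b)

lemma sp_ne_nil (cs : List Char) : sp cs ≠ [] := by
  induction cs with
  | nil => simp [sp]
  | cons c cs ih =>
    rw [sp]
    split
    · simp
    · cases h : sp cs with
      | nil => exact absurd h ih
      | cons x xs => simp

lemma splitOn_go_eq : ∀ (l : List Char) (fuel : Nat) (cur : List Char) (acc : List (List Char)),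
    l.length ≤ fuel →
    PySem.Chars.splitOn.go ['1'] fuel l cur acc
      = acc.reverse ++ (sp l).modifyHead (fun b => cur.reverse ++ b) := by
  intro l
  induction l with
  | nil =>
    intro fuel cur acc _
    cases fuel <;> simp [PySem.Chars.splitOn.go, sp]
  | cons c rest ih =>
    intro fuel cur acc h
    match fuel with
    | f + 1 =>
      rw [PySem.Chars.splitOn.go]
      by_cases hc : c = '1'
      · subst hc
        have hpre : ['1'].isPrefixOf ('1' :: rest) = true := by simp [List.isPrefixOf]
        rw [if_pos hpre]
        rw [show List.drop ['1'].length ('1' :: rest) = rest from rfl]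
        rw [ih f [] (cur.reverse :: acc) (by simpa using Nat.lt_succ_iff.mp (by simpa using h))]
        cases hsp : sp rest with
        | nil => exact absurd hsp (sp_ne_nil rest)
        | cons x xs => simp [sp, hsp, List.modifyHead]
      · have hpre : ['1'].isPrefixOf (c :: rest) = false := by
          simp [List.isPrefixOf]
          exact fun h' => absurd h'.symm hc
        rw [if_neg (by simp [hpre])]
        rw [ih f (c :: cur) acc (by simpa using Nat.lt_succ_iff.mp (by simpa using h))]
        rw [sp, if_neg hc]
        cases hsp : sp rest with
        | nil => exact absurd hsp (sp_ne_nil rest)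
        | cons x xs => simp [List.modifyHead]

lemma splitOn_eq_sp (cs : List Char) : PySem.Chars.splitOn cs ['1'] = sp cs := by
  rw [PySem.Chars.splitOn, splitOn_go_eq cs (cs.length + 1) [] [] (by omega)]
  cases h : sp cs with
  | nil => exact absurd h (sp_ne_nil cs)
  | cons x xs => simp

lemma sp_append_one (cs : List Char) : sp (cs ++ ['1']) = sp cs ++ [[]] := by
  induction cs with
  | nil => simp [sp]
  | cons c cs ih =>
    by_cases hc : c = '1'
    · subst hc; simp [sp, ih]
    · simp only [List.cons_append, sp, if_neg hc, ih]
      cases h : sp cs with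
      | nil => exact absurd h (sp_ne_nil cs)
      | cons x xs => simp [List.modifyHead]

-- modify the last element
def mlast (f : List Char → List Char) : List (List Char) → List (List Char)
  | [] => []
  | [x] => [f x]
  | x :: y :: xs => x :: mlast f (y :: xs)

lemma mlast_append_singleton (f : List Char → List Char) (l : List (List Char)) (x : List Char) :
    mlast f (l ++ [x]) = l ++ [f x] := by
  induction l with
  | nil => simp [mlast]
  | cons a l ih =>
    cases l with
    | nil => simp [mlast]
    | cons b l' => simpa [mlast] using ih

lemma modifyHead_mlast (c : Char) (d : Char) (l : List (List Char)) :
    (mlast (fun b => b ++ [d]) l).modifyHead (fun b => c :: b)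
      = mlast (fun b => b ++ [d]) (l.modifyHead (fun b => c :: b)) := by
  match l with
  | [] => simp [mlast]
  | [x] => simp [mlast, List.modifyHead]
  | x :: y :: xs => simp [mlast, List.modifyHead]

lemma sp_append_zero (cs : List Char) : sp (cs ++ ['0']) = mlast (fun b => b ++ ['0']) (sp cs) := by
  induction cs with
  | nil => simp [sp, mlast, List.modifyHead]
  | cons c cs ih =>
    by_cases hc : c = '1'
    · subst hc
      simp only [List.cons_append, sp, ih]
      cases h : sp cs with
      | nil => exact absurd h (sp_ne_nil cs)
      | cons x xs => simp [mlast]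
    · simp only [List.cons_append, sp, if_neg hc, ih]
      exact modifyHead_mlast c '0' (sp cs)

-- "all zero-blocks have even length"
def evAll (bs : List (List Char)) : Bool := bs.all (fun b => b.length % 2 == 0)

def E (cs : List Char) : Bool := evAll (sp cs)

lemma E_append_one (cs : List Char) : E (cs ++ ['1']) = E cs := by
  simp [E, sp_append_one, evAll]

lemma mlast_ne_nil (f : List Char → List Char) : ∀ (l : List (List Char)), l ≠ [] → mlast f l ≠ []
  | [], h => absurd rfl h
  | [x], _ => by simp [mlast]
  | _ :: _ :: _, _ => by simp [mlast]

lemma mlast_mlast (f g : List Char → List Char) :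
    ∀ (l : List (List Char)), mlast f (mlast g l) = mlast (fun x => f (g x)) l
  | [] => rfl
  | [x] => rfl
  | x :: y :: xs => by
    have ihr := mlast_mlast f g (y :: xs)
    cases h : mlast g (y :: xs) with
    | nil => exact absurd h (mlast_ne_nil g (y :: xs) (by simp))
    | cons z zs =>
      rw [show mlast g (x :: y :: xs) = x :: mlast g (y :: xs) from rfl, h,
        show mlast f (x :: z :: zs) = x :: mlast f (z :: zs) from rfl, ← h, ihr]
      rfl

lemma evAll_mlast_even (cs2 : List Char) (h2 : cs2.length % 2 = 0) :
    ∀ (l : List (List Char)), evAll (mlast (fun b => b ++ cs2) l) = evAll l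
  | [] => rfl
  | [x] => by
    simp [mlast, evAll, Nat.add_mod, h2]
  | x :: y :: xs => by
    have ihr := evAll_mlast_even cs2 h2 (y :: xs)
    simp only [mlast, evAll, List.all_cons] at ihr ⊢
    rw [ihr]

lemma E_append_00 (cs : List Char) : E (cs ++ ['0', '0']) = E cs := by
  have h1 : cs ++ ['0', '0'] = (cs ++ ['0']) ++ ['0'] := by simp
  rw [E, h1, sp_append_zero, sp_append_zero, mlast_mlast]
  have h2 : (fun x : List Char => (x ++ ['0']) ++ ['0']) = (fun b : List Char => b ++ ['0', '0']) := by
    funext x; simp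
  rw [h2, evAll_mlast_even ['0', '0'] (by simp) (sp cs)]
  rfl

lemma E_append_10 (cs : List Char) : E (cs ++ ['1', '0']) = false := by
  have : cs ++ ['1', '0'] = (cs ++ ['1']) ++ ['0'] := by simp
  rw [E, this, sp_append_zero, sp_append_one, mlast_append_singleton]
  simp [evAll]

lemma bits_one : bits 1 = ['1'] := by rw [bits]; simp [Nat.digitChar]

lemma bits_two_mul (m : Nat) (h : 1 ≤ m) : bits (2 * m) = bits m ++ ['0'] := by
  rw [bits]
  have h1 : ¬ 2 * m < 2 := by omega
  rw [if_neg h1]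
  have h2 : 2 * m / 2 = m := by omega
  have h3 : 2 * m % 2 = 0 := by omega
  rw [h2, h3]
  rfl

lemma bits_two_mul_add_one (m : Nat) (h : 1 ≤ m) : bits (2 * m + 1) = bits m ++ ['1'] := by
  rw [bits]
  have h1 : ¬ 2 * m + 1 < 2 := by omega
  rw [if_neg h1]
  have h2 : (2 * m + 1) / 2 = m := by omega
  have h3 : (2 * m + 1) % 2 = 1 := by omega
  rw [h2, h3]
  rfl

-- The heart: A's per-element test equals the recurrence value.
lemma E_bits_eq_bsRec : ∀ (m : Nat), 1 ≤ m → (if E (bits m) then (1 : Int) else 0) = bsRec m := by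
  intro m
  induction m using Nat.strong_induction_on with
  | _ m ih =>
    intro hm
    match m, hm with
    | 1, _ =>
      rw [bits_one]
      have : E ['1'] = true := by decide
      rw [this, bsRec]
      norm_num [bsRec]
    | (m + 2), _ =>
      set M := m + 2 with hM
      by_cases hodd : M % 2 = 1
      · -- M = 2k+1, k ≥ 1
        obtain ⟨k, hk⟩ : ∃ k, M = 2 * k + 1 := ⟨M / 2, by omega⟩
        have hk1 : 1 ≤ k := by omega
        rw [hk, bits_two_mul_add_one k hk1, E_append_one, ih k (by omega) hk1]
        rw [show (2 * k + 1) = (2 * k) + 1 from rfl, bsRec]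
        have : (2 * k + 1) % 2 = 1 := by omega
        rw [if_pos this]
        congr 1
        omega
      · by_cases h4 : M % 4 = 0
        · -- M = 4k, k ≥ 1
          obtain ⟨k, hk⟩ : ∃ k, M = 4 * k := ⟨M / 4, by omega⟩
          have hk1 : 1 ≤ k := by omega
          have e1 : bits M = bits k ++ ['0', '0'] := by
            rw [show M = 2 * (2 * k) from by omega, bits_two_mul _ (by omega),
              show 2 * k = 2 * k from rfl, bits_two_mul k hk1]
            simp
          rw [e1, E_append_00, ih k (by omega) hk1]
          obtain ⟨p, hp⟩ : ∃ p, M = p + 1 := ⟨M - 1, by omega⟩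
          rw [hp, bsRec]
          have h1 : ¬ (p + 1) % 2 = 1 := by omega
          have h2 : (p + 1) % 4 = 0 := by omega
          rw [if_neg h1, if_pos h2]
          congr 1
          omega
        · -- M = 4k+2
          obtain ⟨k, hk⟩ : ∃ k, M = 4 * k + 2 := ⟨M / 4, by omega⟩
          have e1 : bits M = (if k = 0 then [] else bits k) ++ ['1', '0'] := by
            rw [show M = 2 * (2 * k + 1) from by omega, bits_two_mul _ (by omega)]
            by_cases hk0 : k = 0
            · subst hk0; rw [if_pos rfl]; rw [bits_one]; rfl
            · rw [if_neg hk0, bits_two_mul_add_one k (by omega)]; simp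
          rw [e1, E_append_10]
          obtain ⟨p, hp⟩ : ∃ p, M = p + 1 := ⟨M - 1, by omega⟩
          rw [hp, bsRec]
          have h1 : ¬ (p + 1) % 2 = 1 := by omega
          have h2 : ¬ (p + 1) % 4 = 0 := by omega
          rw [if_neg h1, if_neg h2]
          simp

-- Casting helpers for Python // and % on nonnegative arguments.
lemma pymod_two (a : Nat) : PySem.Int.mod (a : Int) 2 = ((a % 2 : Nat) : Int) := by
  rw [PySem.Int.mod, Int.fmod_eq_emod, if_pos (Or.inl (by norm_num))]
  push_cast
  omega
lemma pymod_four (a : Nat) : PySem.Int.mod (a : Int) 4 = ((a % 4 : Nat) : Int) := by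
  rw [PySem.Int.mod, Int.fmod_eq_emod, if_pos (Or.inl (by norm_num))]
  push_cast
  omega
lemma pydiv_two (a : Nat) : PySem.Int.floordiv (a : Int) 2 = ((a / 2 : Nat) : Int) := by
  rw [PySem.Int.floordiv, Int.fdiv_eq_ediv, if_pos (Or.inl (by norm_num))]
  push_cast
  omega
lemma pydiv_four (a : Nat) : PySem.Int.floordiv (a : Int) 4 = ((a / 4 : Nat) : Int) := by
  rw [PySem.Int.floordiv, Int.fdiv_eq_ediv, if_pos (Or.inl (by norm_num))]
  push_cast
  omega

-- Port A rewritten as a map of the E ∘ bits test.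
lemma A_eq_map (n : Int) :
    baumsweet_sequence n
      = (PySem.List.pyRange 1 (n + 1) 1).map (fun i => if E (bits i.toNat) then (1 : Int) else 0) := by
  rw [baumsweet_sequence]
  have hstep : (fun (result : List Int) (i : Int) =>
      let binary : String := PySem.Str.slice (PySem.Int.pyBin i) (some 2) none
      let zero_blocks : List (List Char) := PySem.Chars.splitOn binary.toList ['1']
      if zero_blocks.all (fun block => PySem.Int.mod (PySem.Chars.len block) 2 == 0) then
        result ++ [1]
      else
        result ++ [0])
      = fun result i => result ++ [if (PySem.Chars.splitOn
          (PySem.Str.slice (PySem.Int.pyBin i) (some 2) none).toList ['1']).all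
            (fun block => PySem.Int.mod (PySem.Chars.len block) 2 == 0) then (1 : Int) else 0] := by
    funext result i
    simp only []
    split <;> rfl
  rw [hstep, PySem.List.foldl_append_singleton_eq_map]
  rw [List.nil_append]
  apply List.map_congr_left
  intro i hi
  have hi1 : 1 ≤ i := (PySem.List.mem_pyRange_one.mp hi).1
  have hnn : ¬ i < 0 := by omega
  -- the sliced string is exactly bits i.toNat
  have hbin : (PySem.Str.slice (PySem.Int.pyBin i) (some 2) none).toList = bits i.toNat := by
    rw [PySem.Str.toList_slice, PySem.Chars.slice_eq_listSlice, PySem.List.slice_from _ (by omega),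
      PySem.Int.toList_pyBin, PySem.Int.toBinChars0b, if_neg hnn]
    simpa using toDigits_eq_bits i.toNat
  rw [hbin]
  rw [splitOn_eq_sp]
  have hfun : (fun block => PySem.Int.mod (PySem.Chars.len block) 2 == 0)
      = (fun b : List Char => b.length % 2 == 0) := by
    funext b
    rw [PySem.Chars.len_eq, pymod_two b.length]
    have : b.length % 2 = 0 ∨ b.length % 2 = 1 := by omega
    rcases this with h | h <;> simp [h]
  rw [hfun]
  rfl

-- Port B's fold builds the table of bsRec values 0..m.
lemma B_foldl (m : Nat) :
    (PySem.List.pyRange 1 ((m : Int) + 1) 1).foldl (fun b i =>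
      if PySem.Int.mod i 2 == 1 then
        b ++ [PySem.List.pyGetD b (PySem.Int.floordiv i 2) 0]
      else if PySem.Int.mod i 4 == 0 then
        b ++ [PySem.List.pyGetD b (PySem.Int.floordiv i 4) 0]
      else
        b ++ [0]) [1]
      = (List.range (m + 1)).map bsRec := by
  induction m with
  | zero =>
    rw [PySem.List.pyRange_one_eq_nil (by omega)]
    simp [List.range_succ, bsRec]
  | succ m ih =>
    have hsplit : PySem.List.pyRange 1 ((m : Int) + 1 + 1) 1
        = PySem.List.pyRange 1 ((m : Int) + 1) 1 ++ [(m : Int) + 1] := by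
      exact_mod_cast PySem.List.pyRange_one_succ_right (a := 1) (b := (m : Int) + 1) (by omega)
    rw [show ((m + 1 : Nat) : Int) + 1 = (m : Int) + 1 + 1 from by push_cast; ring, hsplit,
      List.foldl_append, ih]
    simp only [List.foldl_cons, List.foldl_nil]
    have hcast : ((m : Int) + 1) = ((m + 1 : Nat) : Int) := by push_cast; ring
    rw [hcast, pymod_two (m + 1), pymod_four (m + 1),
      pydiv_two (m + 1), pydiv_four (m + 1)]
    rw [List.range_succ (n := m + 1), List.map_append]
    by_cases h2 : (m + 1) % 2 = 1
    · rw [if_pos (by simp; omega), PySem.List.pyGetD_natCast,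
        PySem.List.getD_map_range _ _ _ _ (by omega)]
      congr 1
      simp only [List.map_cons, List.map_nil]
      congr 1
      rw [bsRec, if_pos h2]
    · rw [if_neg (by simp; omega)]
      by_cases h4 : (m + 1) % 4 = 0
      · rw [if_pos (by simp; omega), PySem.List.pyGetD_natCast,
          PySem.List.getD_map_range _ _ _ _ (by omega)]
        congr 1
        simp only [List.map_cons, List.map_nil]
        congr 1
        rw [bsRec, if_neg h2, if_pos h4]
      · rw [if_neg (by simp; omega)]
        congr 1
        simp only [List.map_cons, List.map_nil]
        congr 1
        rw [bsRec, if_neg h2, if_neg h4]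

-- ===== VERDICT (by name: the statement is the Claim_ definition above) =====
theorem baumsweet_sequence_spec : Claim_equal_baumsweet_sequence := by
  intro n _
  unfold Spec_baumsweet_sequence baumsweet_sequence_alt
  by_cases hn : n ≤ 0
  · rw [A_eq_map, PySem.List.pyRange_one_eq_nil (by omega)]
    simp [PySem.List.slice_from]
  · obtain ⟨m, hm⟩ : ∃ m : Nat, n = (m : Int) := ⟨n.toNat, by omega⟩
    subst hm
    rw [B_foldl m]
    rw [PySem.List.slice_from _ (by omega)]
    rw [A_eq_map, PySem.List.pyRange_one]
    rw [List.range_succ_eq_map, List.map_cons, List.map_map, List.map_map]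
    simp only [Int.toNat_one, List.drop_succ_cons, List.drop_zero]
    have hb : (1 : Int) + 1 + (m : Int) - 1 - 1 = (m : Int) := by ring
    rw [show ((m : Int) + 1 - 1).toNat = m from by omega]
    apply List.map_congr_left
    intro k hk
    have hcast : ((1 : Int) + (k : Int)).toNat = k + 1 := by omega
    simp only [Function.comp_apply, hcast]
    rw [E_bits_eq_bsRec (k + 1) (by omega)]
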